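-- pv_equiv track=rewrite | github.com/celalalyaprak/data-structures-algorithms-playground | project-g3-000-dsa/athlete.py | _title_case_part
-- ===== SOURCE A (Python) =====
-- _COMBINING_DOT = '\u0307'
--
-- def _title_case_part(part: str) -> str:
--     """
--     Apply title case to a single name part, handling Turkish İ, apostrophes, and Mc/Mac prefixes.
--     """
--     if not part:
--         return part
--     if len(part) == 1:
--         return part.upper()
--
--     # Check for Turkish İ at start (i + combining dot U+0307)
--     if len(part) > 1 and part[0] == 'i' and part[1] == _COMBINING_DOT:
--         return 'İ' + part[2:].lower()
--
--     # Handle apostrophes (O'Brien, D'Almeida, etc.)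
--     # Right single quote ' (U+2019) and regular apostrophe '
--     if "'" in part or '\u2019' in part:
--         # Split on apostrophes, title case each segment
--         segments = []
--         current = []
--         for char in part:
--             if char in ("'", '\u2019'):
--                 if current:
--                     seg = ''.join(current)
--                     segments.append(seg[0].upper() + seg[1:].lower() if len(seg) > 1 else seg.upper())
--                     current = []
--                 segments.append(char)
--             else:
--                 current.append(char)
--         if current:
--             seg = ''.join(current)
--             segments.append(seg[0].upper() + seg[1:].lower() if len(seg) > 1 else seg.upper())
--         return ''.join(segments)
--
--     # Handle Mc/Mac prefix (McKenzie, McDonald, MacGregor, etc.)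
--     part_lower = part.lower()
--     if len(part) > 2 and part_lower.startswith('mc'):
--         # McKenzie -> Mc + Kenzie -> Mc + capitalize(kenzie)
--         return 'Mc' + part[2].upper() + part[3:].lower()
--     elif len(part) > 3 and part_lower.startswith('mac'):
--         # MacGregor -> Mac + Gregor -> Mac + capitalize(gregor)
--         return 'Mac' + part[3].upper() + part[4:].lower()
--
--     # Standard title case
--     return part[0].upper() + part[1:].lower()
-- ===== SOURCE B (Python) =====
-- import re
--
-- _COMBINING_DOT = '\u0307'
--
-- def _title_case_part(part: str) -> str:
--     if not part:
--         return part
--     if len(part) == 1: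
--         return part.upper()
--     if part[0] == 'i' and part[1] == _COMBINING_DOT:
--         return 'İ' + part[2:].lower()
--     if "'" in part or '\u2019' in part:
--         # Partition up front: re.split keeps the captured apostrophes as pieces.
--         pieces = []
--         for piece in re.split(r"(['\u2019])", part):
--             if piece in ("'", '\u2019'):
--                 pieces.append(piece)
--             elif piece:
--                 pieces.append(piece[0].upper() + piece[1:].lower() if len(piece) > 1 else piece.upper())
--         return ''.join(pieces)
--     lower = part.lower()
--     prefix = ''
--     if len(part) > 3 and lower.startswith('mac'):
--         prefix = 'mac'
--     elif len(part) > 2 and lower.startswith('mc'):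
--         prefix = 'mc'
--     k = len(prefix)
--     return prefix.capitalize() + part[k].upper() + part[k + 1:].lower()
-- ===== Notes on version B (the rewrite author's own statement) =====
-- stated objective: idiomatic
-- what changed: The apostrophe case partitions the string up front with re.split (keeping the captured apostrophes) instead of streaming char-by-char with an accumulator, and the Mc/Mac/default tail is unified into a single prefix computation (prefix.capitalize() + part[k].upper() + part[k+1:].lower()) instead of three separate return branches.
import Mathlib
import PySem

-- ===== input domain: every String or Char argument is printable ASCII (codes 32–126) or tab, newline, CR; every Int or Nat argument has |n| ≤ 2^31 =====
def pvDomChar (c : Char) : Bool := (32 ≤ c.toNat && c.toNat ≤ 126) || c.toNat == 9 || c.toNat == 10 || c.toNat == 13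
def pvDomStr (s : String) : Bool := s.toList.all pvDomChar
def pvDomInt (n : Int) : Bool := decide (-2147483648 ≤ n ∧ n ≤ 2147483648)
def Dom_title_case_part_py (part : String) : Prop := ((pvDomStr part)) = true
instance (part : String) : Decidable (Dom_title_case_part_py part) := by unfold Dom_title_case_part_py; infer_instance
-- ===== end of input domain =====

-- B replaces A's char-by-char apostrophe loop with an up-front split keeping delimiters, and
-- unifies the Mc/Mac/default branches into one prefix computation (objective: idiomatic).

-- ===== PORT A =====
-- seg[0].upper() + seg[1:].lower() / seg.upper(); rendered with upper of the 1-char prefix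
-- (exact: A only applies this to nonempty `current`).
def pvCapA (seg : List Char) : List Char :=
  if seg.length > 1 then PySem.Chars.upper (seg.take 1) ++ PySem.Chars.lower (seg.drop 1)
  else PySem.Chars.upper seg

-- A's `for char in part` loop with `segments`/`current` state, including the trailing flush.
def pvLoopA : List Char → List Char → List (List Char) → List (List Char)
  | [], cur, segs => if cur = [] then segs else segs ++ [pvCapA cur]
  | c :: cs, cur, segs =>
    if c = '\'' ∨ c = '’' then
      pvLoopA cs [] ((if cur = [] then segs else segs ++ [pvCapA cur]) ++ [[c]])
    else pvLoopA cs (cur ++ [c]) segs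

def title_case_part_py (part : String) : String :=
  let cs := part.toList
  if cs = [] then part
  else if cs.length = 1 then String.ofList (PySem.Chars.upper cs)
  else if 1 < cs.length ∧ cs.take 1 = ['i'] ∧ (cs.drop 1).take 1 = ['\u0307'] then
    String.ofList ('İ' :: PySem.Chars.lower (cs.drop 2))
  else if PySem.Chars.isIn ['\''] cs ∨ PySem.Chars.isIn ['’'] cs then
    String.ofList ((pvLoopA cs [] []).flatten)   -- ''.join(segments)
  else
    let lowerCs := PySem.Chars.lower cs
    if 2 < cs.length ∧ PySem.Chars.startswith lowerCs ['m', 'c'] then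
      String.ofList ('M' :: 'c' :: (PySem.Chars.upper ((cs.drop 2).take 1) ++ PySem.Chars.lower (cs.drop 3)))
    else if 3 < cs.length ∧ PySem.Chars.startswith lowerCs ['m', 'a', 'c'] then
      String.ofList ('M' :: 'a' :: 'c' :: (PySem.Chars.upper ((cs.drop 3).take 1) ++ PySem.Chars.lower (cs.drop 4)))
    else
      String.ofList (PySem.Chars.upper (cs.take 1) ++ PySem.Chars.lower (cs.drop 1))

-- ===== PORT B =====
def pvCapB (seg : List Char) : List Char :=
  if seg.length > 1 then PySem.Chars.upper (seg.take 1) ++ PySem.Chars.lower (seg.drop 1)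
  else PySem.Chars.upper seg

-- re.split(r"(['\u2019])", part): text pieces and captured one-char delimiter pieces.
def pvSplitKeep : List Char → List (List Char)
  | [] => [[]]
  | c :: cs =>
    if c = '\'' ∨ c = '’' then [] :: [c] :: pvSplitKeep cs
    else
      match pvSplitKeep cs with
      | [] => [[c]]
      | s :: rest => (c :: s) :: rest

-- the body of B's `for piece in …` loop (delimiters kept, empty pieces dropped, text capped).
def pvPieceB (p : List Char) : List Char :=
  if p = ['\''] ∨ p = ['’'] then p
  else if p = [] then []
  else pvCapB p

-- prefix.capitalize(): exact for the lowercase ASCII prefixes '', 'mc', 'mac' used here.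
def pvCapitalize : List Char → List Char
  | [] => []
  | c :: r => PySem.Chars.upper [c] ++ r

def title_case_part_py_alt (part : String) : String :=
  let cs := part.toList
  if cs = [] then part
  else if cs.length = 1 then String.ofList (PySem.Chars.upper cs)
  else if cs.take 1 = ['i'] ∧ (cs.drop 1).take 1 = ['\u0307'] then
    String.ofList ('İ' :: PySem.Chars.lower (cs.drop 2))
  else if PySem.Chars.isIn ['\''] cs ∨ PySem.Chars.isIn ['’'] cs then
    String.ofList (((pvSplitKeep cs).map pvPieceB).flatten)
  else
    let lowerCs := PySem.Chars.lower cs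
    let pre : List Char :=
      if 3 < cs.length ∧ PySem.Chars.startswith lowerCs ['m', 'a', 'c'] then ['m', 'a', 'c']
      else if 2 < cs.length ∧ PySem.Chars.startswith lowerCs ['m', 'c'] then ['m', 'c']
      else []
    let k := pre.length
    String.ofList (pvCapitalize pre ++ PySem.Chars.upper ((cs.drop k).take 1) ++ PySem.Chars.lower (cs.drop (k + 1)))

-- ===== PRECONDITION & SPEC =====
def Spec_title_case_part_py (part : String) (out : String) : Prop := out = title_case_part_py_alt part
instance (part : String) (out : String) : Decidable (Spec_title_case_part_py part out) := by unfold Spec_title_case_part_py; infer_instance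

-- ===== CLAIM (what is proved, stated in full; the proofs are below) =====
def Claim_equal_title_case_part_py : Prop := ∀ (part : String), Dom_title_case_part_py part → Spec_title_case_part_py part (title_case_part_py part)

-- ===== LEMMAS AND PROOFS =====

-- prepend `cur` onto the head piece of a split
def pvConsHead (cur : List Char) : List (List Char) → List (List Char)
  | [] => [cur]
  | s :: rest => (cur ++ s) :: rest

lemma pvPieceB_no_apos (cur : List Char) (h : ∀ c ∈ cur, ¬(c = '\'' ∨ c = '’')) :
    pvPieceB cur = if cur = [] then [] else pvCapB cur := by
  cases cur with
  | nil => simp [pvPieceB]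
  | cons c r =>
    have hc := h c (by simp)
    have hno : ¬((c :: r) = ['\''] ∨ (c :: r) = ['’']) := by
      rintro (he | he) <;> (simp at he; exact hc (by tauto))
    unfold pvPieceB
    rw [if_neg hno]

lemma pvSplitKeep_ne_nil (cs : List Char) : pvSplitKeep cs ≠ [] := by
  cases cs with
  | nil => simp [pvSplitKeep]
  | cons c cs =>
    rw [pvSplitKeep]
    split
    · simp
    · cases pvSplitKeep cs <;> simp

lemma pvLoopA_eq (cs : List Char) : ∀ (cur : List Char) (segs : List (List Char)),
    (∀ c ∈ cur, ¬(c = '\'' ∨ c = '’')) →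
    (pvLoopA cs cur segs).flatten
      = segs.flatten ++ ((pvConsHead cur (pvSplitKeep cs)).map pvPieceB).flatten := by
  induction cs with
  | nil =>
    intro cur segs h
    simp [pvLoopA, pvSplitKeep, pvConsHead, pvPieceB_no_apos cur h]
    split <;> simp [pvCapA, pvCapB, *]
  | cons c cs ih =>
    intro cur segs h
    by_cases hc : c = '\'' ∨ c = '’'
    · rw [pvLoopA, if_pos hc, ih [] _ (by simp), pvSplitKeep, if_pos hc]
      have hpc : pvPieceB [c] = [c] := by
        rcases hc with h | h <;> simp [pvPieceB, h]
      cases hsk : pvSplitKeep cs with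
      | nil => exact absurd hsk (pvSplitKeep_ne_nil cs)
      | cons s rest =>
        simp [pvConsHead, pvPieceB_no_apos cur h, hpc]
        split <;> simp [pvCapA, pvCapB, *]
    · rw [pvLoopA, if_neg hc, ih (cur ++ [c]) segs (by
        intro x hx
        rcases List.mem_append.mp hx with hx | hx
        · exact h x hx
        · simp at hx; subst hx; exact hc)]
      rw [pvSplitKeep, if_neg hc]
      cases hsk : pvSplitKeep cs with
      | nil => simp [pvConsHead]
      | cons s rest => simp [pvConsHead]

lemma pvApos_branch (cs : List Char) :
    (pvLoopA cs [] []).flatten = ((pvSplitKeep cs).map pvPieceB).flatten := by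
  rw [pvLoopA_eq cs [] [] (by simp)]
  cases hsk : pvSplitKeep cs with
  | nil => exact absurd hsk (pvSplitKeep_ne_nil cs)
  | cons s rest => simp [pvConsHead]

lemma pv_mc_not_mac (l : List Char) (h : PySem.Chars.startswith l ['m', 'c'] = true) :
    PySem.Chars.startswith l ['m', 'a', 'c'] = false := by
  rw [PySem.Chars.startswith_iff] at h
  by_contra hmac
  rw [Bool.not_eq_false, PySem.Chars.startswith_iff] at hmac
  obtain ⟨t, ht⟩ := h
  obtain ⟨t', ht'⟩ := hmac
  rw [← ht'] at ht
  simp at ht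

-- ===== VERDICT (by name: the statement is the Claim_ definition above) =====
theorem title_case_part_py_spec : Claim_equal_title_case_part_py := by
  intro part _
  unfold Spec_title_case_part_py title_case_part_py title_case_part_py_alt
  set cs := part.toList with hcs
  by_cases h0 : cs = []
  · simp [h0]
  · rw [if_neg h0, if_neg h0]
    by_cases h1 : cs.length = 1
    · rw [if_pos h1, if_pos h1]
    · rw [if_neg h1, if_neg h1]
      have hlen : 1 < cs.length := by
        have := List.length_pos_of_ne_nil h0
        omega
      by_cases hturk : cs.take 1 = ['i'] ∧ (cs.drop 1).take 1 = ['\u0307']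
      · rw [if_pos ⟨hlen, hturk.1, hturk.2⟩, if_pos hturk]
      · rw [if_neg (by tauto), if_neg hturk]
        by_cases hap : PySem.Chars.isIn ['\''] cs = true ∨ PySem.Chars.isIn ['’'] cs = true
        · rw [if_pos hap, if_pos hap, pvApos_branch]
        · rw [if_neg hap, if_neg hap]
          have hupm : PySem.Chars.upper ['m'] = ['M'] := rfl
          by_cases hmc : 2 < cs.length ∧ PySem.Chars.startswith (PySem.Chars.lower cs) ['m', 'c'] = true
          · have hA := pv_mc_not_mac _ hmc.2
            simp [hmc.1, hmc.2, hA, pvCapitalize, hupm]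
          · by_cases hmac : 3 < cs.length ∧ PySem.Chars.startswith (PySem.Chars.lower cs) ['m', 'a', 'c'] = true
            · simp [hmc, hmac.1, hmac.2, pvCapitalize, hupm]
            · simp [hmc, hmac, pvCapitalize]
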